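-- pv_equiv track=rewrite | github.com/Samyak2607/CompetitiveProgramming | GeeksForGeeks/BitWise/swapBits.py | swapBits
-- ===== SOURCE A (Python) =====
-- def swapBits(n):
--     s=''
--     x=bin(n).split('b')[1]
--     if len(x)%2!=0:
--         x='0'+x[:]
--     for i in range(len(x)-1,0,-2):
--         s=x[i]+x[i-1]+s
--     return int(s,2)
-- ===== SOURCE B (Python) =====
-- def swapBits(n):
--     # Swap adjacent bit pairs arithmetically, two bits at a time.
--     # abs(n): bin(n).split('b')[1] in the original drops the sign, so the
--     # function acts on the magnitude.
--     m = abs(n)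
--     r = 0
--     w = 1
--     while m > 0:
--         p = m % 4
--         r += (2 * (p % 2) + p // 2) * w
--         m //= 4
--         w *= 4
--     return r
-- ===== Notes on version B (the rewrite author's own statement) =====
-- stated objective: alternative
-- what changed: A converts the number to a binary string, pads it, rebuilds the string with each adjacent character pair swapped and parses it back; B never touches strings: it peels two bits at a time off abs(n) arithmetically (p = m % 4), adds the swapped pair back at the right weight, and accumulates the result in one numeric loop.
import Mathlib
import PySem

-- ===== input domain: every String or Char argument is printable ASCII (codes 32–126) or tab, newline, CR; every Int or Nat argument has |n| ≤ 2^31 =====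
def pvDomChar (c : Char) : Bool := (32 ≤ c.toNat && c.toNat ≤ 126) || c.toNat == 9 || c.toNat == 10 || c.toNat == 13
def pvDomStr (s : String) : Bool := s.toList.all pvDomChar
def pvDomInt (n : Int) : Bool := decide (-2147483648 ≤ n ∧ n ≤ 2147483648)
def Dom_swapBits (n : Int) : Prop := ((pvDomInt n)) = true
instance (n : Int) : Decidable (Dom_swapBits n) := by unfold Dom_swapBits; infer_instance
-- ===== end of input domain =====

-- B replaces A's binary-string building / pair-swapping / reparsing by a purely arithmetic
-- loop that peels two bits at a time off abs(n) (alternative algorithm, same cost class).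


-- ===== PORT A =====
-- int(s, 2): ported by hand as the base-2 digit fold (PySem.Int.ofCharsBase? exists, but its
-- digit-value helper is a private definition with no reasoning API); exact here because the s
-- this program builds is always a nonempty list of '0'/'1' characters with no sign, space or
-- underscore, on which CPython's int(s, 2) computes exactly this fold.
def parseBin2 (cs : List Char) : Int :=
  cs.foldl (fun a c => 2 * a + (if c = '1' then (1 : Int) else 0)) 0

def swapBits (n : Int) : Int :=
  -- x = bin(n).split('b')[1]   (the split always yields ≥ 2 pieces, so [1] never raises and
  -- pyGetD's defaults are never used)
  let x : List Char :=
    PySem.List.pyGetD ((PySem.Chars.split? (PySem.Int.toBinChars0b n) ['b']).getD []) 1 []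
  -- if len(x) % 2 != 0: x = '0' + x[:]
  let x : List Char := if PySem.Chars.len x % 2 ≠ 0 then '0' :: x else x
  -- for i in range(len(x)-1, 0, -2): s = x[i] + x[i-1] + s   (indices always in range, so
  -- pyGetD's default ' ' is never used)
  let s : List Char :=
    (PySem.List.pyRange (PySem.Chars.len x - 1) 0 (-2)).foldl
      (fun s i => PySem.List.pyGetD x i ' ' :: PySem.List.pyGetD x (i - 1) ' ' :: s) []
  -- return int(s, 2)
  parseBin2 s

-- ===== PORT B =====
-- the while loop of Source B, with its three state variables (m, r, w)
def swapBitsLoop (m r w : Int) : Int :=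
  if 0 < m then
    swapBitsLoop (PySem.Int.floordiv m 4)
      (r + (2 * PySem.Int.mod (PySem.Int.mod m 4) 2 + PySem.Int.floordiv (PySem.Int.mod m 4) 2) * w)
      (w * 4)
  else r
termination_by m.toNat
decreasing_by
  rename_i h
  rw [PySem.Int.floordiv_eq_ediv_of_pos (by norm_num)]
  omega

def swapBits_alt (n : Int) : Int := swapBitsLoop (n.natAbs : Int) 0 1

-- ===== PRECONDITION & SPEC =====
def Spec_swapBits (n : Int) (out : Int) : Prop := out = swapBits_alt n
instance (n : Int) (out : Int) : Decidable (Spec_swapBits n out) := by unfold Spec_swapBits; infer_instance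

-- ===== CLAIM (what is proved, stated in full; the proofs are below) =====
def Claim_equal_swapBits : Prop := ∀ (n : Int), Dom_swapBits n → Spec_swapBits n (swapBits n)

-- ===== LEMMAS AND PROOFS =====

-- the common specification: swap adjacent bit pairs of a natural number
def g (m : Nat) : Nat :=
  if m = 0 then 0 else 2 * (m % 2) + m / 2 % 2 + 4 * g (m / 4)
termination_by m
decreasing_by exact Nat.div_lt_self (Nat.pos_of_ne_zero (by assumption)) (by norm_num)


def binChars (m : Nat) : List Char :=
  if m = 0 then [] else binChars (m / 2) ++ [Nat.digitChar (m % 2)]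
termination_by m
decreasing_by exact Nat.div_lt_self (Nat.pos_of_ne_zero (by assumption)) (by norm_num)

def bc (m : Nat) : List Char := if m = 0 then ['0'] else binChars m

theorem toDigitsCore_eq (m : Nat) : ∀ (f : Nat) (ds : List Char), 0 < m → m < 2 ^ f →
    Nat.toDigitsCore 2 f m ds = binChars m ++ ds := by
  induction m using Nat.strong_induction_on with
  | _ m ih =>
    intro f ds hm hf
    match f with
    | 0 => simp at hf; omega
    | f + 1 =>
      rw [Nat.toDigitsCore]
      by_cases h2 : m / 2 = 0
      · have hm1 : m = 1 := by omega
        subst hm1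
        have b1 : binChars 1 = ['1'] := by rw [binChars, binChars]; simp; decide
        simp [b1]; decide
      · rw [if_neg h2]
        rw [ih (m / 2) (Nat.div_lt_self hm (by norm_num)) f _ (Nat.pos_of_ne_zero h2)
            (by rw [pow_succ] at hf; omega)]
        conv_rhs => rw [binChars, if_neg (by omega)]
        simp

theorem toDigits_eq_bc (m : Nat) : Nat.toDigits 2 m = bc m := by
  by_cases hm : m = 0
  · subst hm; decide
  · rw [Nat.toDigits, toDigitsCore_eq m (m + 1) [] (Nat.pos_of_ne_zero hm)
      (by
        calc m < 2 ^ m := Nat.lt_two_pow_self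
        _ < 2 ^ (m + 1) := Nat.pow_lt_pow_succ (by norm_num))]
    simp [bc, hm]

theorem mem_binChars (m : Nat) : ∀ c ∈ binChars m, c = '0' ∨ c = '1' := by
  induction m using Nat.strong_induction_on with
  | _ m ih =>
    intro c hc
    by_cases hm : m = 0
    · subst hm; rw [binChars] at hc; simp at hc
    · rw [binChars, if_neg hm] at hc
      rcases List.mem_append.1 hc with h | h
      · exact ih (m / 2) (Nat.div_lt_self (Nat.pos_of_ne_zero hm) (by norm_num)) c h
      · simp at h
        have : m % 2 = 0 ∨ m % 2 = 1 := by omega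
        rcases this with h2 | h2 <;> rw [h2] at h <;> [left; right] <;> rw [h] <;> decide

theorem mem_bc (m : Nat) : ∀ c ∈ bc m, c = '0' ∨ c = '1' := by
  intro c hc
  by_cases hm : m = 0
  · subst hm; simp [bc] at hc; left; exact hc
  · rw [bc, if_neg hm] at hc; exact mem_binChars m c hc

theorem splitOn_go_no_sep (l : List Char) : ∀ (fuel : Nat) (cur : List Char) (acc : List (List Char)),
    l.length < fuel → 'b' ∉ l →
    PySem.Chars.splitOn.go ['b'] fuel l cur acc = ((cur.reverse ++ l) :: acc).reverse := by
  induction l with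
  | nil =>
    intro fuel cur acc hf _
    match fuel with
    | f + 1 => rw [PySem.Chars.splitOn.go] <;> simp
  | cons c rest ih =>
    intro fuel cur acc hf hb
    match fuel with
    | f + 1 =>
      rw [PySem.Chars.splitOn.go]
      have hpre : (['b'] : List Char).isPrefixOf (c :: rest) = false := by
        simp [List.isPrefixOf]
        intro h; apply hb; rw [← h]; exact List.mem_cons_self
      rw [hpre]
      simp only [Bool.false_eq_true, if_false]
      rw [ih f (c :: cur) acc (by simpa using Nat.lt_of_succ_lt_succ hf) (by intro h; exact hb (List.mem_cons_of_mem _ h))]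
      simp

theorem splitOn_go_split (v : List Char) (hv : 'b' ∉ v) :
    ∀ (u : List Char) (fuel : Nat) (cur : List Char) (acc : List (List Char)), 'b' ∉ u →
    (u ++ 'b' :: v).length < fuel →
    PySem.Chars.splitOn.go ['b'] fuel (u ++ 'b' :: v) cur acc
      = acc.reverse ++ [cur.reverse ++ u, v] := by
  intro u
  induction u with
  | nil =>
    intro fuel cur acc _ hf
    match fuel with
    | f + 1 =>
      simp only [List.nil_append]
      rw [PySem.Chars.splitOn.go]
      have hpre : (['b'] : List Char).isPrefixOf ('b' :: v) = true := by
        simp [List.isPrefixOf]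
      simp only [hpre, if_true, List.length_cons, List.drop_succ_cons, List.length_nil,
        List.drop_zero]
      rw [splitOn_go_no_sep v f [] (cur.reverse :: acc) (by simp at hf; omega) hv]
      simp
  | cons c u' ih =>
    intro fuel cur acc hu hf
    match fuel with
    | f + 1 =>
      have hc : c ≠ 'b' := fun h => hu (by rw [h]; exact List.mem_cons_self)
      simp only [List.cons_append]
      rw [PySem.Chars.splitOn.go]
      have hpre : (['b'] : List Char).isPrefixOf (c :: (u' ++ 'b' :: v)) = false := by
        simp [List.isPrefixOf]
        intro h; exact hc h.symm
      simp only [List.cons_append, hpre, Bool.false_eq_true, if_false]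
      rw [ih f (c :: cur) acc (fun h => hu (List.mem_cons_of_mem _ h)) (by simp at hf ⊢; omega)]
      simp

theorem splitOn_single (u v : List Char) (hu : 'b' ∉ u) (hv : 'b' ∉ v) :
    PySem.Chars.splitOn (u ++ 'b' :: v) ['b'] = [u, v] := by
  rw [PySem.Chars.splitOn]
  rw [splitOn_go_split v hv u ((u ++ 'b' :: v).length + 1) [] [] hu (by omega)]
  simp

theorem split_step (n : Int) :
    PySem.List.pyGetD ((PySem.Chars.split? (PySem.Int.toBinChars0b n) ['b']).getD []) 1 []
      = bc n.natAbs := by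
  have hd : 'b' ∉ Nat.toDigits 2 n.natAbs := by
    rw [toDigits_eq_bc]
    intro h
    rcases mem_bc _ _ h with h' | h' <;> simp at h'
  have hsplit : PySem.Chars.split? (PySem.Int.toBinChars0b n) ['b']
      = some (PySem.Chars.splitOn (PySem.Int.toBinChars0b n) ['b']) := by
    simp [PySem.Chars.split?]
  rw [hsplit]
  rw [PySem.Int.toBinChars0b]
  by_cases hn : n < 0
  · rw [if_pos hn]
    have : ('-' :: '0' :: 'b' :: Nat.toDigits 2 n.natAbs)
        = ['-', '0'] ++ 'b' :: Nat.toDigits 2 n.natAbs := by simp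
    rw [this, splitOn_single ['-', '0'] _ (by decide) hd]
    simp [toDigits_eq_bc]
    rfl
  · rw [if_neg hn]
    have hta : n.toNat = n.natAbs := by omega
    have : ('0' :: 'b' :: Nat.toDigits 2 n.toNat)
        = ['0'] ++ 'b' :: Nat.toDigits 2 n.toNat := by simp
    rw [this, splitOn_single ['0'] _ (by decide) (hta ▸ hd)]
    simp [hta, toDigits_eq_bc]
    rfl

def pe (cs : List Char) : List Char := if cs.length % 2 ≠ 0 then '0' :: cs else cs

def sp : List Char → List Char
  | a :: b :: t => b :: a :: sp t
  | t => t

def val (cs : List Char) : Nat := cs.foldl (fun a c => 2 * a + (if c = '1' then 1 else 0)) 0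

theorem sp_append (x : List Char) (hx : x.length % 2 = 0) (c d : Char) :
    sp (x ++ [c, d]) = sp x ++ [d, c] := by
  fun_induction sp x with
  | case1 a b t ih =>
    simp only [List.cons_append, sp]
    rw [ih (by simp at hx; omega)]
  | case2 t ht =>
    match t, hx, ht with
    | [], _, _ => simp [sp]
    | [a], hx, _ => simp at hx
    | a :: b :: t'', _, ht => exact (ht a b t'' rfl).elim

theorem val_foldl (cs : List Char) : ∀ (a : Nat),
    cs.foldl (fun a c => 2 * a + (if c = '1' then 1 else 0)) a = a * 2 ^ cs.length + val cs := by
  induction cs with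
  | nil => intro a; simp [val]
  | cons c t ih =>
    intro a
    simp only [List.foldl_cons, List.length_cons, val]
    rw [ih (2 * a + (if c = '1' then 1 else 0)), ih (2 * 0 + (if c = '1' then 1 else 0))]
    ring

theorem val_append_two (u : List Char) (c d : Char) :
    val (u ++ [c, d]) = 4 * val u + 2 * (if c = '1' then 1 else 0) + (if d = '1' then 1 else 0) := by
  have h := val_foldl [c, d] (val u)
  simp only [val, List.foldl_append] at *
  rw [h]
  simp only [List.length_cons, List.length_nil, List.foldl_cons, List.foldl_nil]
  ring

theorem pe_even (cs : List Char) : (pe cs).length % 2 = 0 := by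
  rw [pe]
  by_cases h : cs.length % 2 = 0 <;> simp [h] <;> omega

theorem pyRange_neg_two_cons (a : Int) (ha : 0 < a) :
    PySem.List.pyRange a 0 (-2) = a :: PySem.List.pyRange (a - 2) 0 (-2) := by
  rw [PySem.List.pyRange, PySem.List.pyRange]
  norm_num
  rw [if_pos ha]
  have hc : ((a + 2 - 1) / 2).toNat = (if 2 < a then ((a - 1) / 2).toNat else 0) + 1 := by
    split_ifs with h <;> omega
  rw [hc, List.range_succ_eq_map]
  simp [List.map_map]
  intro k _
  omega

theorem mem_pyRange_neg_two (a i : Int) (h : i ∈ PySem.List.pyRange a 0 (-2)) : 0 < i ∧ i ≤ a := by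
  rw [PySem.List.pyRange] at h
  norm_num at h
  split_ifs at h with h1
  · obtain ⟨k, hk, rfl⟩ := h
    omega
  · simp at h

theorem exists_two (x : List Char) (m : Nat) (h : x.length = m + 2) :
    ∃ y c d, x = y ++ [c, d] ∧ y.length = m := by
  match hx : x.reverse with
  | [] => rw [← x.reverse_reverse, hx] at h; simp at h
  | [a] => rw [← x.reverse_reverse, hx] at h; simp at h
  | d :: c :: t =>
    refine ⟨t.reverse, c, d, ?_, ?_⟩
    · rw [← x.reverse_reverse, hx]; simp
    · rw [← x.reverse_reverse, hx] at h; simp at h ⊢; omega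

theorem pyRange_neg_one_zero : PySem.List.pyRange (-1) 0 (-2) = [] := by decide

theorem loop_eq (k : Nat) : ∀ (x : List Char), x.length = 2 * k → ∀ (s : List Char),
    (PySem.List.pyRange ((x.length : Int) - 1) 0 (-2)).foldl
      (fun s i => PySem.List.pyGetD x i ' ' :: PySem.List.pyGetD x (i - 1) ' ' :: s) s
    = sp x ++ s := by
  induction k with
  | zero =>
    intro x hx s
    have : x = [] := List.eq_nil_of_length_eq_zero (by omega)
    subst this
    simp [pyRange_neg_one_zero, sp]
  | succ k ih =>
    intro x hx s
    obtain ⟨y, c, d, rfl, hy⟩ := exists_two x (2 * k) (by omega)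
    have hlen : ((y ++ [c, d]).length : Int) - 1 = 2 * (k : Int) + 1 := by
      simp [hy]; push_cast; ring
    rw [hlen, pyRange_neg_two_cons _ (by positivity), List.foldl_cons]
    have hget1 : PySem.List.pyGetD (y ++ [c, d]) (2 * (k : Int) + 1) ' ' = d := by
      rw [PySem.List.pyGetD_eq_getElem _ ' ' (by positivity) (by simp [hy] <;> omega)]
      have hidx : ((2 * (k : Int) + 1)).toNat = 2 * k + 1 := by omega
      simp only [hidx]
      rw [List.getElem_append_right (by omega)]
      simp [hy]
    have hget0 : PySem.List.pyGetD (y ++ [c, d]) (2 * (k : Int) + 1 - 1) ' ' = c := by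
      rw [PySem.List.pyGetD_eq_getElem _ ' ' (by omega) (by simp [hy] <;> omega)]
      have hidx : ((2 * (k : Int) + 1 - 1)).toNat = 2 * k := by omega
      simp only [hidx]
      rw [List.getElem_append_right (by omega)]
      simp [hy]
    rw [hget1, hget0]
    have hcongr : (PySem.List.pyRange (2 * (k : Int) + 1 - 2) 0 (-2)).foldl
        (fun s i => PySem.List.pyGetD (y ++ [c, d]) i ' '
          :: PySem.List.pyGetD (y ++ [c, d]) (i - 1) ' ' :: s) (d :: c :: s)
      = (PySem.List.pyRange (2 * (k : Int) + 1 - 2) 0 (-2)).foldl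
        (fun s i => PySem.List.pyGetD y i ' ' :: PySem.List.pyGetD y (i - 1) ' ' :: s)
        (d :: c :: s) := by
      apply PySem.List.foldl_congr_mem
      intro acc i hi
      obtain ⟨hi1, hi2⟩ := mem_pyRange_neg_two _ _ hi
      have e1 : PySem.List.pyGetD (y ++ [c, d]) i ' ' = PySem.List.pyGetD y i ' ' := by
        rw [PySem.List.pyGetD_eq_getElem _ ' ' (by omega) (by simp [hy] <;> omega),
            PySem.List.pyGetD_eq_getElem _ ' ' (by omega) (by simp [hy] <;> omega)]
        rw [List.getElem_append_left (by simp [hy] <;> omega)]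
      have e2 : PySem.List.pyGetD (y ++ [c, d]) (i - 1) ' ' = PySem.List.pyGetD y (i - 1) ' ' := by
        rw [PySem.List.pyGetD_eq_getElem _ ' ' (by omega) (by simp [hy] <;> omega),
            PySem.List.pyGetD_eq_getElem _ ' ' (by omega) (by simp [hy] <;> omega)]
        rw [List.getElem_append_left (by simp [hy] <;> omega)]
      rw [e1, e2]
    rw [hcongr]
    have harg : 2 * (k : Int) + 1 - 2 = ((y.length : Int)) - 1 := by rw [hy]; push_cast; ring
    rw [harg, ih y hy (d :: c :: s), sp_append y (by omega) c d]
    simp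

theorem parseBin2_foldl (cs : List Char) : ∀ (a : Nat),
    cs.foldl (fun a c => 2 * a + (if c = '1' then (1 : Int) else 0)) (a : Int)
      = ((cs.foldl (fun a c => 2 * a + (if c = '1' then 1 else 0)) a : Nat) : Int) := by
  induction cs with
  | nil => intro a; simp
  | cons c t ih =>
    intro a
    simp only [List.foldl_cons]
    have : (2 * (a : Int) + (if c = '1' then (1 : Int) else 0))
        = ((2 * a + (if c = '1' then 1 else 0) : Nat) : Int) := by
      split_ifs <;> push_cast <;> ring
    rw [this, ih]

theorem parseBin2_eq_val (cs : List Char) : parseBin2 cs = (val cs : Int) := by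
  rw [parseBin2, val]
  exact_mod_cast parseBin2_foldl cs 0

theorem binChars_four (m : Nat) (hm : 4 ≤ m) :
    binChars m = binChars (m / 4) ++ [Nat.digitChar (m / 2 % 2), Nat.digitChar (m % 2)] := by
  conv_lhs => rw [binChars, if_neg (by omega)]
  conv_lhs => rw [binChars, if_neg (by omega)]
  rw [Nat.div_div_eq_div_mul]
  simp

theorem binChars_len_parity (m : Nat) (hm : 4 ≤ m) :
    (binChars m).length % 2 = (binChars (m / 4)).length % 2 := by
  rw [binChars_four m hm]
  simp

theorem pe_append_two (u : List Char) (c d : Char) (h : (u ++ [c, d]).length % 2 = u.length % 2) :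
    pe (u ++ [c, d]) = pe u ++ [c, d] := by
  rw [pe, pe, h]
  split_ifs <;> simp

theorem bit_digitChar (b : Nat) (hb : b < 2) :
    (if Nat.digitChar b = '1' then 1 else 0) = b := by
  match b, hb with
  | 0, _ => decide
  | 1, _ => decide

theorem val_sp_pe_bc (m : Nat) : val (sp (pe (bc m))) = g m := by
  induction m using Nat.strong_induction_on with
  | _ m ih =>
    by_cases hm : 4 ≤ m
    · have hq : m / 4 < m := Nat.div_lt_self (by omega) (by norm_num)
      have hbc : bc m = binChars m := by rw [bc, if_neg (by omega)]
      have hbcq : bc (m / 4) = binChars (m / 4) := by rw [bc, if_neg (by omega)]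
      rw [hbc, binChars_four m hm,
          pe_append_two _ _ _ (by have := binChars_len_parity m hm; simp <;> omega),
          sp_append _ (pe_even _) _ _, val_append_two,
          bit_digitChar _ (by omega), bit_digitChar _ (by omega)]
      rw [← hbcq] at *
      rw [ih (m / 4) hq]
      conv_rhs => rw [g, if_neg (by omega)]
      ring
    · interval_cases m
      · have h : bc 0 = ['0'] := by simp [bc]
        rw [h]; simp [g, pe, sp, val]
      · have h : bc 1 = ['1'] := by simp [bc, binChars]; decide
        rw [h]; simp [g, pe, sp, val]
      · have h : bc 2 = ['1', '0'] := by simp [bc, binChars]; decide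
        rw [h]; simp [g, pe, sp, val]
      · have h : bc 3 = ['1', '1'] := by simp [bc, binChars]; decide
        rw [h]; simp [g, pe, sp, val]

theorem swapBitsLoop_eq (m : Nat) : ∀ (r w : Int), swapBitsLoop (m : Int) r w = r + (g m : Int) * w := by
  induction m using Nat.strong_induction_on with
  | _ m ih =>
    intro r w
    rw [swapBitsLoop, g]
    by_cases hm : m = 0
    · simp [hm]
    · have h4 : m / 4 < m := Nat.div_lt_self (Nat.pos_of_ne_zero hm) (by norm_num)
      rw [if_pos (by exact_mod_cast Nat.pos_of_ne_zero hm), if_neg hm]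
      have e1 : PySem.Int.floordiv (m : Int) 4 = ((m / 4 : Nat) : Int) := by
        rw [PySem.Int.floordiv_eq_ediv_of_pos (by norm_num)]; omega
      have e2 : PySem.Int.mod (m : Int) 4 = ((m % 4 : Nat) : Int) := by
        rw [PySem.Int.mod_eq_emod_of_pos (by norm_num)]; omega
      have e3 : PySem.Int.mod ((m % 4 : Nat) : Int) 2 = ((m % 4 % 2 : Nat) : Int) := by
        rw [PySem.Int.mod_eq_emod_of_pos (by norm_num)]; omega
      have e4 : PySem.Int.floordiv ((m % 4 : Nat) : Int) 2 = ((m % 4 / 2 : Nat) : Int) := by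
        rw [PySem.Int.floordiv_eq_ediv_of_pos (by norm_num)]; omega
      rw [e1, e2, e3, e4, ih _ h4]
      push_cast
      have hc : (2 * ((m : Int) % 4 % 2) + (m : Int) % 4 / 2)
          = 2 * ((m : Int) % 2) + (m : Int) / 2 % 2 := by omega
      rw [hc]; ring

theorem swapBits_eq_g (n : Int) : swapBits n = (g n.natAbs : Int) := by
  rw [swapBits]
  simp only [split_step]
  have hpe : (if PySem.Chars.len (bc n.natAbs) % 2 ≠ 0 then '0' :: bc n.natAbs else bc n.natAbs)
      = pe (bc n.natAbs) := by
    rw [pe]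
    have : PySem.Chars.len (bc n.natAbs) % 2 ≠ 0 ↔ (bc n.natAbs).length % 2 ≠ 0 := by
      rw [PySem.Chars.len_eq]; omega
    split_ifs with h1 h2 <;> tauto
  rw [hpe]
  have hlen : PySem.Chars.len (pe (bc n.natAbs)) - 1 = ((pe (bc n.natAbs)).length : Int) - 1 := by
    rw [PySem.Chars.len_eq]
  rw [hlen]
  obtain ⟨k, hk⟩ : ∃ k, (pe (bc n.natAbs)).length = 2 * k := by
    have h := pe_even (bc n.natAbs)
    exact ⟨(pe (bc n.natAbs)).length / 2, by omega⟩
  rw [loop_eq k _ hk []]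
  rw [List.append_nil, parseBin2_eq_val, val_sp_pe_bc]

-- ===== VERDICT (by name: the statement is the Claim_ definition above) =====
theorem swapBits_spec : Claim_equal_swapBits := by
  intro n _
  unfold Spec_swapBits
  rw [swapBits_eq_g, swapBits_alt, swapBitsLoop_eq]
  ring
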